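-- pv_equiv track=rewrite | github.com/miliar/Code_Jam_Webscraper | solutions_python/solutions_year14_round0_nr4/1729.py | wo
-- ===== SOURCE A (Python) =====
-- import copy
--
-- def wo(nao, ken):
--     nao = copy.copy(nao)
--     ken = copy.copy(ken)
--     point = 0
--     # Loop
--     while len(nao) and len(ken):
--         if nao[0] > ken[0]:
--             point += 1
--             nao.pop(0)
--             ken.pop(len(ken)-1)
--         else:
--             nao.pop(0)
--             ken.pop(0)
--     return point
-- ===== SOURCE B (Python) =====
-- def wo(nao, ken):
--     # Index pointers over the original lists: i scans nao, j is ken's front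
--     # pointer and k its exclusive back pointer; no O(n) pops.
--     i = 0
--     j = 0
--     k = len(ken)
--     point = 0
--     while i < len(nao) and j < k:
--         if nao[i] > ken[j]:
--             point += 1
--             k -= 1
--         else:
--             j += 1
--         i += 1
--     return point
-- ===== Notes on version B (the rewrite author's own statement) =====
-- stated objective: faster
-- what changed: B replaces A's destructive list copies with pop(0)/pop(-1) by three index pointers over the unmodified input lists (front of nao, front and back of ken), turning the quadratic pop(0) loop into a single O(n) pointer scan.
import Mathlib
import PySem

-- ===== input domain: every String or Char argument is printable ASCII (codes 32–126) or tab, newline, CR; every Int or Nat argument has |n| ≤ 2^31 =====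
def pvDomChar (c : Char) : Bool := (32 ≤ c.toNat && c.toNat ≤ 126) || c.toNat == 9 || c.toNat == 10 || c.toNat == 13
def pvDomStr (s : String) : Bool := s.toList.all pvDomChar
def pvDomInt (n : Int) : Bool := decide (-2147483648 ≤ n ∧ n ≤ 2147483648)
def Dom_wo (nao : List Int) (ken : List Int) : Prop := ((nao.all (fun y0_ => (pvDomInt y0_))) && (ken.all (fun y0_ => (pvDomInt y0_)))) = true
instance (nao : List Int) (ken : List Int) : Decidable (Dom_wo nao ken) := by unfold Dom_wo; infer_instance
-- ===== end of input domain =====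

-- B replaces A's destructive pop(0)/pop(-1) loop by three index pointers over
-- the unmodified inputs: an O(n) scan instead of A's quadratic list popping.

-- ===== PORT A =====
-- A's while loop: both lists nonempty; win → drop nao's head and ken's last,
-- otherwise drop both heads.
def woLoop : List Int → List Int → Int → Int
  | [], _, p => p
  | _ :: _, [], p => p
  | a :: ns, b :: ks, p =>
      if a > b then woLoop ns (b :: ks).dropLast (p + 1)
      else woLoop ns ks p

def wo (nao : List Int) (ken : List Int) : Int := woLoop nao ken 0

-- ===== PORT B =====
-- B's while loop: i scans nao, j / k are ken's front and (exclusive) back pointers.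
def woAltLoop (nao ken : List Int) (i j k : Nat) (p : Int) : Int :=
  if _h : i < nao.length ∧ j < k then
    if nao.getD i 0 > ken.getD j 0 then woAltLoop nao ken (i + 1) j (k - 1) (p + 1)
    else woAltLoop nao ken (i + 1) (j + 1) k p
  else p
termination_by nao.length - i
decreasing_by all_goals omega

def wo_alt (nao : List Int) (ken : List Int) : Int := woAltLoop nao ken 0 0 ken.length 0

-- ===== PRECONDITION & SPEC =====
def Spec_wo (nao : List Int) (ken : List Int) (out : Int) : Prop := out = wo_alt nao ken
instance (nao : List Int) (ken : List Int) (out : Int) : Decidable (Spec_wo nao ken out) := by unfold Spec_wo; infer_instance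

-- ===== CLAIM (what is proved, stated in full; the proofs are below) =====
def Claim_equal_wo : Prop := ∀ (nao : List Int) (ken : List Int), Dom_wo nao ken → Spec_wo nao ken (wo nao ken)

-- ===== LEMMAS AND PROOFS =====

lemma dropLast_drop_comm (l : List Int) (j : Nat) :
    (l.drop j).dropLast = l.dropLast.drop j := by
  rw [List.dropLast_eq_take, List.dropLast_eq_take, List.drop_take, List.take_drop,
      List.drop_take]
  congr 1
  rw [List.length_drop]
  omega

-- Invariant: A's surviving nao is nao.drop i and A's surviving ken is the
-- contiguous slice (ken.take k).drop j of the original ken.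
lemma loop_eq (nao ken : List Int) :
    ∀ n i j k p, nao.length - i ≤ n → k ≤ ken.length →
      woLoop (nao.drop i) ((ken.take k).drop j) p = woAltLoop nao ken i j k p := by
  intro n
  induction n with
  | zero =>
      intro i j k p hn hk
      have hi : nao.length ≤ i := by omega
      rw [List.drop_eq_nil_of_le hi]
      rw [woAltLoop, dif_neg (by omega)]
      simp only [woLoop]
  | succ n ih =>
      intro i j k p hn hk
      by_cases hi : i < nao.length
      · by_cases hjk : j < k
        · have hslice : (ken.take k).drop j = ken[j]! :: (ken.take k).drop (j + 1) := by
            have hlen : (ken.take k).length = k := by simp; omega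
            have hj' : j < (ken.take k).length := by omega
            rw [List.drop_eq_getElem_cons hj']
            congr 1
            rw [List.getElem_take]
            simp [List.getElem!_eq_getElem?_getD, List.getElem?_eq_getElem (by omega : j < ken.length)]
          have hnao : nao.drop i = nao[i]! :: nao.drop (i + 1) := by
            rw [List.drop_eq_getElem_cons hi]
            simp [List.getElem!_eq_getElem?_getD, List.getElem?_eq_getElem hi]
          rw [hslice, hnao, woAltLoop]
          simp only [woLoop, hi, hjk, and_true, dite_true]
          have hga : nao.getD i 0 = nao[i]! := by
            simp [List.getD, List.getElem!_eq_getElem?_getD]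
          have hgb : ken.getD j 0 = ken[j]! := by
            simp [List.getD, List.getElem!_eq_getElem?_getD, List.getElem?_eq_getElem (by omega : j < ken.length)]
          rw [hga, hgb]
          by_cases hab : nao[i]! > ken[j]!
          all_goals simp only [hab, if_pos, if_neg, not_false_iff]
          · -- win branch: dropLast of the slice is the slice with back pointer k-1
            have hdl : (ken[j]! :: (ken.take k).drop (j + 1)).dropLast
                = (ken.take (k - 1)).drop j := by
              rw [← hslice]
              have h1 : ((ken.take k).drop j).dropLast = ((ken.take k).dropLast).drop j :=
                dropLast_drop_comm _ j
              rw [h1]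
              congr 1
              rw [List.dropLast_eq_take, List.take_take]
              congr 1
              rw [List.length_take]
              omega
            rw [hdl]
            exact ih (i + 1) j (k - 1) (p + 1) (by omega) (by omega)
          · exact ih (i + 1) (j + 1) k p (by omega) hk
        · -- j ≥ k : slice empty, both loops stop
          have : (ken.take k).drop j = [] := by
            apply List.drop_eq_nil_of_le
            rw [List.length_take]
            omega
          rw [this, woAltLoop, dif_neg (by omega)]
          cases h : nao.drop i <;> simp [woLoop]
      · have : nao.drop i = [] := List.drop_eq_nil_of_le (by omega)
        rw [this, woAltLoop]
        simp only [woLoop]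
        split <;> simp_all

-- ===== VERDICT (by name: the statement is the Claim_ definition above) =====
theorem wo_spec : Claim_equal_wo := by
  intro nao ken _
  unfold Spec_wo wo wo_alt
  have := loop_eq nao ken nao.length 0 0 ken.length 0 (by omega) (le_refl _)
  simpa using this
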